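-- pv_equiv track=rewrite | github.com/Danchuong/scriba | scriba/animation/primitives/_svg_helpers.py | _wrap_label_lines
-- ===== SOURCE A (Python) =====
-- _LABEL_MAX_WIDTH_CHARS = 24
--
-- def _wrap_label_lines(text: str, max_chars: int = _LABEL_MAX_WIDTH_CHARS) -> list[str]:
--     """Split label text into lines at natural break points if it exceeds *max_chars*.
--
--     Split characters: space, comma, ``+``, ``=``.  The ``-`` character is
--     intentionally excluded from splitting to avoid breaking LaTeX math
--     expressions like ``$f(x)=-4$`` across lines.  Inside ``$...$`` delimiters
--     no splitting occurs at all (``in_math`` guard).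
--     """
--     if len(text) <= max_chars:
--         return [text]
--     # Split at spaces, operators, commas — but NOT inside $...$ math regions.
--     tokens: list[str] = []
--     current = ""
--     in_math = False
--     for ch in text:
--         if ch == "$":
--             in_math = not in_math
--         current += ch
--         if not in_math and ch in (" ", ",", "+", "="):
--             tokens.append(current)
--             current = ""
--     if current:
--         tokens.append(current)
--
--     lines: list[str] = []
--     line = ""
--     for tok in tokens:
--         if line and len(line) + len(tok) > max_chars:
--             lines.append(line.rstrip())
--             line = tok
--         else:
--             line += tok
--     if line:
--         lines.append(line.rstrip())
--     return lines if lines else [text]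
-- ===== SOURCE B (Python) =====
-- _LABEL_MAX_WIDTH_CHARS = 24
--
-- def _wrap_label_lines(text: str, max_chars: int = _LABEL_MAX_WIDTH_CHARS) -> list[str]:
--     """One-pass wrap: no intermediate token list; a pending word buffer is
--     merged into the current line as soon as each break char (outside $...$)
--     completes it."""
--     if len(text) <= max_chars:
--         return [text]
--     lines: list[str] = []
--     line = ""
--     word = ""
--     in_math = False
--     for ch in text:
--         if ch == "$":
--             in_math = not in_math
--         word += ch
--         if not in_math and ch in (" ", ",", "+", "="):
--             if line and len(line) + len(word) > max_chars:
--                 lines.append(line.rstrip())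
--                 line = word
--             else:
--                 line += word
--             word = ""
--     if word:
--         if line and len(line) + len(word) > max_chars:
--             lines.append(line.rstrip())
--             line = word
--         else:
--             line += word
--     if line:
--         lines.append(line.rstrip())
--     return lines if lines else [text]
-- ===== Notes on version B (the rewrite author's own statement) =====
-- stated objective: simpler
-- what changed: Fuses A's two passes (tokenize into a list, then fold tokens into lines) into one pass over the characters that keeps a pending-word buffer and merges each completed word into the current line directly, never materialising the token list.
import Mathlib
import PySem

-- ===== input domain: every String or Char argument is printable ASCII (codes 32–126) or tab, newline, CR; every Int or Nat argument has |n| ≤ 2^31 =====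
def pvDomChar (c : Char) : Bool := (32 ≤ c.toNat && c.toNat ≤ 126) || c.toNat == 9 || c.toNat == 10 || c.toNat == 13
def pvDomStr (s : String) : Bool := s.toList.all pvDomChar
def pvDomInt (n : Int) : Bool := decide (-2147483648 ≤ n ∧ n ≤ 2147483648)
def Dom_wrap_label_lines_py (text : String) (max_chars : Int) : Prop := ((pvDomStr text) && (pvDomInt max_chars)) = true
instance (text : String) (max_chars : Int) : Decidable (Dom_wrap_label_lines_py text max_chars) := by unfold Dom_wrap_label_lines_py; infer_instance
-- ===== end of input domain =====

-- B fuses A's tokenize-then-fold two-pass wrapping into one character pass with a pending-word buffer (objective: simpler).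


-- ===== PORT A =====
-- first loop of A: build the token list (strings kept as List Char)
def wlA_tokens : List Char → List Char → Bool → List (List Char)
  | [], current, _ =>
      if current ≠ [] then [current] else []
  | ch :: rest, current, in_math =>
      let in_math' := if ch = '$' then !in_math else in_math
      let current' := current ++ [ch]
      if ¬ in_math' ∧ (ch = ' ' ∨ ch = ',' ∨ ch = '+' ∨ ch = '=') then
        current' :: wlA_tokens rest [] in_math'
      else
        wlA_tokens rest current' in_math'

-- second loop of A: fold the tokens into lines
def wlA_fold (max_chars : Int) : List (List Char) → List (List Char) → List Char → List (List Char)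
  | [], lines, line =>
      if line ≠ [] then lines ++ [PySem.Chars.rstrip line] else lines
  | tok :: rest, lines, line =>
      if line ≠ [] ∧ (line.length : Int) + (tok.length : Int) > max_chars then
        wlA_fold max_chars rest (lines ++ [PySem.Chars.rstrip line]) tok
      else
        wlA_fold max_chars rest lines (line ++ tok)

def wrap_label_lines_py (text : String) (max_chars : Int) : List String :=
  if (PySem.Str.len text : Int) ≤ max_chars then [text]
  else
    let tokens := wlA_tokens text.toList [] false
    let lines := wlA_fold max_chars tokens [] []
    if lines ≠ [] then lines.map String.ofList else [text]

-- ===== PORT B =====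
-- B's single loop: pending word buffer, current line, finished lines
def wlB_loop (max_chars : Int) : List Char → Bool → List Char → List Char → List (List Char) → List (List Char)
  | [], _, word, line, lines =>
      -- after the loop: 'if word:' merge it, then 'if line:' flush
      let (lines', line') :=
        if word ≠ [] then
          if line ≠ [] ∧ (line.length : Int) + (word.length : Int) > max_chars then
            (lines ++ [PySem.Chars.rstrip line], word)
          else
            (lines, line ++ word)
        else (lines, line)
      if line' ≠ [] then lines' ++ [PySem.Chars.rstrip line'] else lines'
  | ch :: rest, in_math, word, line, lines =>
      let in_math' := if ch = '$' then !in_math else in_math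
      let word' := word ++ [ch]
      if ¬ in_math' ∧ (ch = ' ' ∨ ch = ',' ∨ ch = '+' ∨ ch = '=') then
        if line ≠ [] ∧ (line.length : Int) + (word'.length : Int) > max_chars then
          wlB_loop max_chars rest in_math' [] word' (lines ++ [PySem.Chars.rstrip line])
        else
          wlB_loop max_chars rest in_math' [] (line ++ word') lines
      else
        wlB_loop max_chars rest in_math' word' line lines

def wrap_label_lines_py_alt (text : String) (max_chars : Int) : List String :=
  if (PySem.Str.len text : Int) ≤ max_chars then [text]
  else
    let lines := wlB_loop max_chars text.toList false [] [] []
    if lines ≠ [] then lines.map String.ofList else [text]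

-- ===== PRECONDITION & SPEC =====
def Spec_wrap_label_lines_py (text : String) (max_chars : Int) (out : List String) : Prop := out = wrap_label_lines_py_alt text max_chars
instance (text : String) (max_chars : Int) (out : List String) : Decidable (Spec_wrap_label_lines_py text max_chars out) := by unfold Spec_wrap_label_lines_py; infer_instance

-- ===== CLAIM (what is proved, stated in full; the proofs are below) =====
def Claim_equal_wrap_label_lines_py : Prop := ∀ (text : String) (max_chars : Int), Dom_wrap_label_lines_py text max_chars → Spec_wrap_label_lines_py text max_chars (wrap_label_lines_py text max_chars)

-- ===== LEMMAS AND PROOFS =====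

-- fusion invariant: B's loop on the remaining characters, with pending word
-- `current`, equals A's fold applied to the tokens A would still emit
theorem wlB_eq_fold (max_chars : Int) (cs : List Char) :
    ∀ (in_math : Bool) (current line : List Char) (lines : List (List Char)),
      wlB_loop max_chars cs in_math current line lines =
        wlA_fold max_chars (wlA_tokens cs current in_math) lines line := by
  induction cs with
  | nil =>
      intro in_math current line lines
      simp only [wlB_loop, wlA_tokens]
      by_cases hc : current ≠ []
      · simp only [if_pos hc, wlA_fold]
        by_cases hb : line ≠ [] ∧ (line.length : Int) + (current.length : Int) > max_chars
        · simp [hb, hc]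
        · simp [hb, hc]
      · simp [hc, wlA_fold]
  | cons ch rest ih =>
      intro in_math current line lines
      simp only [wlB_loop, wlA_tokens]
      by_cases hbrk : ¬ (if ch = '$' then !in_math else in_math) = true ∧
          (ch = ' ' ∨ ch = ',' ∨ ch = '+' ∨ ch = '=')
      · simp only [if_pos hbrk, wlA_fold]
        by_cases hb : line ≠ [] ∧
            (line.length : Int) + ((current ++ [ch]).length : Int) > max_chars
        · simp only [if_pos hb, ih]
        · simp only [if_neg hb, ih]
      · simp only [if_neg hbrk, ih]

theorem wrap_label_lines_py_eq (text : String) (max_chars : Int) :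
    wrap_label_lines_py text max_chars = wrap_label_lines_py_alt text max_chars := by
  unfold wrap_label_lines_py wrap_label_lines_py_alt
  rw [wlB_eq_fold]

-- ===== VERDICT (by name: the statement is the Claim_ definition above) =====
theorem wrap_label_lines_py_spec : Claim_equal_wrap_label_lines_py := by
  intro text max_chars _
  exact wrap_label_lines_py_eq text max_chars
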